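-- pv_equiv track=rewrite | github.com/SorokinStanislav/machine_learning | lab3/task2.py | count_clusters_and_noise
-- ===== SOURCE A (Python) =====
-- def count_clusters_and_noise(labels):
--     clusters = set()
--     noise = 0
--     for label in labels:
--         if label == -1:
--             noise += 1
--         else:
--             clusters.add(label)
--     return len(clusters), noise
-- ===== SOURCE B (Python) =====
-- def count_clusters_and_noise(labels):
--     clusters = 0
--     noise = 0
--     prev = None
--     for label in sorted(labels):
--         if label == -1:
--             noise += 1
--         elif prev is None or prev != label:
--             clusters += 1
--         prev = label
--     return clusters, noise
-- ===== Notes on version B (the rewrite author's own statement) =====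
-- stated objective: alternative
-- what changed: B sorts the labels and counts clusters by adjacency in the sorted order (a new cluster whenever a non -1 label differs from its predecessor), using no set or hash table at all, instead of A's one-pass set-plus-counter.
import Mathlib
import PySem

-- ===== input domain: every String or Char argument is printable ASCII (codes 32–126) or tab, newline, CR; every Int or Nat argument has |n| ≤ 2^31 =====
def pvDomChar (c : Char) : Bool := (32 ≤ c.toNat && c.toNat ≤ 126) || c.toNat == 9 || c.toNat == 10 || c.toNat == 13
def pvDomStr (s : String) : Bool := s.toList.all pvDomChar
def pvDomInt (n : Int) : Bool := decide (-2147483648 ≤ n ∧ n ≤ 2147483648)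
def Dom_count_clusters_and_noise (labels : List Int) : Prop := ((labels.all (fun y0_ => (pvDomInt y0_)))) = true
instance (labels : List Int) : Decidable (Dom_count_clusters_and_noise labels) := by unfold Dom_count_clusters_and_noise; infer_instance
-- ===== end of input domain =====

-- B replaces A's one-pass "set + running noise counter" with sort-then-scan: it sorts the
-- labels and counts a cluster whenever a non -1 label differs from its predecessor (alternative).


-- ===== PORT A =====
def count_clusters_and_noise (labels : List Int) : Int × Int :=
  let st := labels.foldl
    (fun (p : PySem.Set Int × Int) label =>
      if label == -1 then (p.1, p.2 + 1) else (PySem.Set.add p.1 label, p.2))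
    (PySem.Set.empty, 0)
  ((PySem.Set.len st.1 : Int), st.2)

-- ===== PORT B =====
-- the loop body of Source B: state (clusters, noise, prev); prev := label in every branch
def pvStepB (st : Int × Int × Option Int) (label : Int) : Int × Int × Option Int :=
  if label == -1 then (st.1, st.2.1 + 1, some label)
  else if (match st.2.2 with | none => true | some p => p != label) then
    (st.1 + 1, st.2.1, some label)
  else (st.1, st.2.1, some label)

def count_clusters_and_noise_alt (labels : List Int) : Int × Int :=
  let st := (PySem.List.sorted labels (fun x => x) false).foldl pvStepB (0, 0, none)
  (st.1, st.2.1)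

-- ===== PRECONDITION & SPEC =====
def Spec_count_clusters_and_noise (labels : List Int) (out : Int × Int) : Prop := out = count_clusters_and_noise_alt labels
instance (labels : List Int) (out : Int × Int) : Decidable (Spec_count_clusters_and_noise labels out) := by unfold Spec_count_clusters_and_noise; infer_instance

-- ===== CLAIM (what is proved, stated in full; the proofs are below) =====
def Claim_equal_count_clusters_and_noise : Prop := ∀ (labels : List Int), Dom_count_clusters_and_noise labels → Spec_count_clusters_and_noise labels (count_clusters_and_noise labels)

-- ===== LEMMAS AND PROOFS =====

-- clusters still to be counted by B's scan: distinct non -1 values of xs other than prev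
def pvG (xs : List Int) (p : Option Int) : ℕ :=
  match p with
  | none => (xs.toFinset.erase (-1)).card
  | some a => ((xs.toFinset.erase (-1)).erase a).card

-- A's loop in closed form
theorem pv_A_loop (xs : List Int) (s : PySem.Set Int) (n : Int) :
    xs.foldl
      (fun (p : PySem.Set Int × Int) label =>
        if label == -1 then (p.1, p.2 + 1) else (PySem.Set.add p.1 label, p.2))
      (s, n)
    = (PySem.Set.update s (xs.filter (fun l => !(l == -1))), n + (xs.count (-1) : Int)) := by
  induction xs generalizing s n with
  | nil => simp [PySem.Set.update_nil]
  | cons x xs ih =>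
    rw [List.foldl_cons]
    by_cases hx : x = -1
    · subst hx
      rw [if_pos (by decide), ih]
      simp
      omega
    · rw [if_neg (by simpa using hx), ih]
      simp [hx, PySem.Set.update_cons]

-- B's scan over a non-decreasing list, with prev a lower bound of the remainder
theorem pv_B_loop (xs : List Int) (hs : xs.Pairwise (· ≤ ·))
    (p : Option Int) (hp : ∀ y ∈ xs, ∀ a, p = some a → a ≤ y) (c n : Int) :
    ((xs.foldl pvStepB (c, n, p)).1, (xs.foldl pvStepB (c, n, p)).2.1)
      = (c + (pvG xs p : Int), n + (xs.count (-1) : Int)) := by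
  induction xs generalizing p c n with
  | nil => cases p <;> simp [pvG]
  | cons x xs ih =>
    have hle : ∀ y ∈ xs, x ≤ y := by
      intro y hy; exact (List.pairwise_cons.mp hs).1 y hy
    have hs' := (List.pairwise_cons.mp hs).2
    rw [List.foldl_cons]
    by_cases hx : x = -1
    · subst hx
      rw [show pvStepB (c, n, p) (-1) = (c, n + 1, some (-1)) from rfl]
      rw [ih hs' (some (-1)) (by intro y hy a ha; cases ha; exact hle y hy)]
      have hT : ((-1 : Int) :: xs).toFinset.erase (-1) = xs.toFinset.erase (-1) := by
        simp [List.toFinset_cons, Finset.erase_insert_eq_erase]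
      have hnm : ∀ a : Int, a ≤ -1 → a ∉ xs.toFinset.erase (-1) := by
        intro a hale hmem
        rcases Finset.mem_erase.mp hmem with ⟨hne, hmem'⟩
        have := hle a (List.mem_toFinset.mp hmem')
        omega
      have hG : pvG ((-1 : Int) :: xs) p = pvG xs (some (-1)) := by
        cases p with
        | none =>
          simp only [pvG]
          rw [hT, Finset.erase_eq_of_notMem (hnm (-1) (by omega))]
        | some a =>
          have ha : a ≤ -1 := hp (-1) (by simp) a rfl
          simp only [pvG]
          rw [hT, Finset.erase_eq_of_notMem (hnm a ha),
            Finset.erase_eq_of_notMem (hnm (-1) (by omega))]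
      rw [hG]
      simp
      omega
    · have hxb : (x == -1) = false := by simpa using hx
      have hcnt : ((x :: xs).count (-1) : Int) = (xs.count (-1) : Int) := by
        simp [hx]
      have hT : (x :: xs).toFinset.erase (-1)
          = insert x (xs.toFinset.erase (-1)) := by
        rw [List.toFinset_cons, Finset.erase_insert_of_ne hx]
      have hxnot : x ∉ (xs.toFinset.erase (-1)).erase x := Finset.notMem_erase _ _
      have hcard : (insert x (xs.toFinset.erase (-1))).card
          = ((xs.toFinset.erase (-1)).erase x).card + 1 := by
        by_cases hmem : x ∈ xs.toFinset.erase (-1)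
        · rw [Finset.insert_eq_self.mpr hmem]
          exact (Finset.card_erase_add_one hmem).symm
        · rw [Finset.erase_eq_of_notMem hmem,
            Finset.card_insert_of_notMem hmem]
      have hih := ih hs' (some x) (by intro y hy a ha; cases ha; exact hle y hy)
      cases p with
      | none =>
        rw [show pvStepB (c, n, none) x = (c + 1, n, some x) from by
          simp [pvStepB, hxb]]
        rw [hih]
        have hG : (pvG (x :: xs) none : Int) = 1 + (pvG xs (some x) : Int) := by
          simp only [pvG]
          rw [hT, hcard]; push_cast; ring
        rw [hcnt, hG]
        simp only [Prod.mk.injEq]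
        exact ⟨by ring, trivial⟩
      | some q =>
        by_cases hqx : q = x
        · subst hqx
          rw [show pvStepB (c, n, some q) q = (c, n, some q) from by
            simp [pvStepB, hxb]]
          rw [hih]
          have hG : pvG (q :: xs) (some q) = pvG xs (some q) := by
            simp only [pvG]
            rw [hT, Finset.erase_insert_eq_erase]
          rw [hG, hcnt]
        · rw [show pvStepB (c, n, some q) x = (c + 1, n, some x) from by
            simp [pvStepB, hxb, hqx]]
          rw [hih]
          have hq : q ∉ insert x (xs.toFinset.erase (-1)) := by
            intro hmem
            rcases Finset.mem_insert.mp hmem with h | h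
            · exact hqx h
            · rcases Finset.mem_erase.mp h with ⟨_, hmem'⟩
              have h1 := hle q (List.mem_toFinset.mp hmem')
              have h2 := hp x (by simp) q rfl
              exact hqx (le_antisymm h2 h1)
          have hG : (pvG (x :: xs) (some q) : Int) = 1 + (pvG xs (some x) : Int) := by
            simp only [pvG]
            rw [hT, Finset.erase_eq_of_notMem hq, hcard]; push_cast; ring
          rw [hcnt, hG]
          simp only [Prod.mk.injEq]
          exact ⟨by ring, trivial⟩

-- A's distinct non -1 labels, counted as a Finset card
theorem pv_A_card (labels : List Int) :
    (PySem.Set.ofList (labels.filter (fun l => !(l == -1)))).length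
      = (labels.toFinset.erase (-1)).card := by
  have hnd := PySem.Set.nodup_ofList (labels.filter (fun l => !(l == -1)))
  rw [← List.toFinset_card_of_nodup hnd]
  congr 1
  ext a
  simp only [List.mem_toFinset, PySem.Set.mem_ofList, List.mem_filter,
    Finset.mem_erase, Bool.not_eq_eq_eq_not, Bool.not_true, beq_eq_false_iff_ne,
    ne_eq]
  tauto

-- ===== VERDICT (by name: the statement is the Claim_ definition above) =====
theorem count_clusters_and_noise_spec : Claim_equal_count_clusters_and_noise := by
  intro labels _
  unfold Spec_count_clusters_and_noise count_clusters_and_noise count_clusters_and_noise_alt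
  have hperm : (PySem.List.sorted labels (fun x => x) false).Perm labels :=
    PySem.List.sorted_perm labels (fun x => x) false
  have hpair : (PySem.List.sorted labels (fun x => x) false).Pairwise (· ≤ ·) := by
    simpa using PySem.List.sorted_pairwise labels (fun x => x)
  rw [pv_A_loop]
  rw [pv_B_loop _ hpair none (by intro y hy a ha; cases ha) 0 0]
  have hfin : (PySem.List.sorted labels (fun x => x) false).toFinset = labels.toFinset :=
    Finset.ext fun a => by simp [List.mem_toFinset, hperm.mem_iff]
  have hcnt : (PySem.List.sorted labels (fun x => x) false).count (-1) = labels.count (-1) :=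
    hperm.count_eq (-1)
  have hup : PySem.Set.update (PySem.Set.empty : PySem.Set Int) (labels.filter (fun l => !(l == -1)))
      = PySem.Set.ofList (labels.filter (fun l => !(l == -1))) := rfl
  simp only [pvG, hfin, hcnt, PySem.Set.len]
  rw [hup, pv_A_card]
  simp
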